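-- pv_equiv track=rewrite | github.com/OlaszPL/Algorithms_and_data_structures_course | Part 1 - sortowania/Cw1/zad5.py | find_min_missing
-- ===== SOURCE A (Python) =====
-- def find_min_missing(T):
--     n = len(T)
--     i, j = 0, n - 1
--
--     while i <= j:
--         mid = (j - i) // 2 + i
--         if T[mid] == mid: # jeżeli wartość jest równa indeksowi to zajmujemy się prawą częścią
--             i = mid + 1
--         else: # w przeciwnym przypadku lewą
--             j = mid - 1
--
--     return i
-- ===== SOURCE B (Python) =====
-- def find_min_missing(T):
--     # Divide-and-conquer on list slices: rec works on a segment with its base offset,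
--     # halving the segment each call instead of maintaining an (i, j) index pair.
--     def rec(seg, base):
--         if not seg:
--             return base
--         m = (len(seg) - 1) // 2
--         if seg[m] == base + m:
--             return rec(seg[m + 1:], base + m + 1)
--         return rec(seg[:m], base)
--     return rec(T, 0)
-- ===== Notes on version B (the rewrite author's own statement) =====
-- stated objective: alternative
-- what changed: Replaces A's iterative while loop over an (i, j) index pair with a divide-and-conquer recursion that physically halves the list into slices, carrying a base offset instead of mutating indices.
import Mathlib
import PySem

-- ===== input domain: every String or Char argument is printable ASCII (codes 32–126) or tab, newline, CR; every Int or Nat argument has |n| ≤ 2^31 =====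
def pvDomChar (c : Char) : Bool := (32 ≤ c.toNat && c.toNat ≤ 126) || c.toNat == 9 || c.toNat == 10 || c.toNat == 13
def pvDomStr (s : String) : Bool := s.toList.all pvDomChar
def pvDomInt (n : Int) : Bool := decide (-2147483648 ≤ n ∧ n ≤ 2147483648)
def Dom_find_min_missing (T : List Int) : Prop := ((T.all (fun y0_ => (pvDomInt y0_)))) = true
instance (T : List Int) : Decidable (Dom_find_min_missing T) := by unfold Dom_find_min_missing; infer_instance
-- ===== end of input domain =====

-- B replaces A's index-pair while loop by a divide-and-conquer recursion on list
-- slices carrying a base offset (objective: alternative decomposition, same cost).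

-- ===== PORT A =====
-- the while loop of A, as recursion on the state (i, j); T[mid] is always in range
-- when read (0 ≤ i ≤ mid ≤ j < len T), so pyGetD's default is never returned
def findLoopA (T : List Int) (i j : Int) : Int :=
  if h : i ≤ j then
    if PySem.List.pyGetD T (PySem.Int.floordiv (j - i) 2 + i) 0
        = PySem.Int.floordiv (j - i) 2 + i then
      findLoopA T (PySem.Int.floordiv (j - i) 2 + i + 1) j
    else
      findLoopA T i (PySem.Int.floordiv (j - i) 2 + i - 1)
  else i
termination_by (j + 1 - i).toNat
decreasing_by
  all_goals
    simp only [PySem.Int.floordiv_eq_ediv_of_pos (by omega : (0:Int) < 2)]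
    omega

def find_min_missing (T : List Int) : Int := findLoopA T 0 (T.length - 1)

-- ===== PORT B =====
-- rec(seg, base) of Source B; Python's seg[m+1:] / seg[:m] with nonnegative bounds are
-- exactly List.drop / List.take, and seg[m] (0 ≤ m < len seg) is seg.getD m 0
def recB (seg : List Int) (base : Int) : Int :=
  if h : seg = [] then base
  else
    if seg.getD ((seg.length - 1) / 2) 0 = base + ((seg.length - 1) / 2 : Nat) then
      recB (seg.drop ((seg.length - 1) / 2 + 1)) (base + ((seg.length - 1) / 2 : Nat) + 1)
    else
      recB (seg.take ((seg.length - 1) / 2)) base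
termination_by seg.length
decreasing_by
  · have : seg.length ≠ 0 := fun hn => h (List.eq_nil_of_length_eq_zero hn)
    simp only [List.length_drop]; omega
  · have : seg.length ≠ 0 := fun hn => h (List.eq_nil_of_length_eq_zero hn)
    simp only [List.length_take]; omega

def find_min_missing_alt (T : List Int) : Int := recB T 0

-- ===== PRECONDITION & SPEC =====
def Spec_find_min_missing (T : List Int) (out : Int) : Prop := out = find_min_missing_alt T
instance (T : List Int) (out : Int) : Decidable (Spec_find_min_missing T out) := by unfold Spec_find_min_missing; infer_instance

-- ===== CLAIM (what is proved, stated in full; the proofs are below) =====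
def Claim_equal_find_min_missing : Prop := ∀ (T : List Int), Dom_find_min_missing T → Spec_find_min_missing T (find_min_missing T)

-- ===== LEMMAS AND PROOFS =====

-- A's loop on state (i, j) equals B's recursion on the segment T[i..j] with base i.
lemma loop_eq_rec (k : Nat) (T : List Int) (i j : Int)
    (hk : (j + 1 - i).toNat ≤ k) (hi : 0 ≤ i) (hj : j < T.length) :
    findLoopA T i j = recB ((T.drop i.toNat).take (j + 1 - i).toNat) i := by
  induction k generalizing i j with
  | zero =>
    have hij : ¬ i ≤ j := by omega
    rw [findLoopA]
    have h0 : (j + 1 - i).toNat = 0 := by omega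
    rw [h0]
    simp [hij, recB]
  | succ k ih =>
    rw [findLoopA]
    by_cases hij : i ≤ j
    · obtain ⟨a, rfl⟩ := Int.eq_ofNat_of_zero_le hi
      obtain ⟨b, rfl⟩ := Int.eq_ofNat_of_zero_le (le_trans hi hij)
      have hab : a ≤ b := by exact_mod_cast hij
      have hbn : b < T.length := by exact_mod_cast hj
      have hlen : ((b : Int) + 1 - (a : Int)).toNat = b + 1 - a := by omega
      have htn : ((a : Int)).toNat = a := by omega
      rw [hlen, htn]
      have hseg_len : ((T.drop a).take (b + 1 - a)).length = b + 1 - a := by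
        simp [List.length_take, List.length_drop]; omega
      have hne : (T.drop a).take (b + 1 - a) ≠ [] := by
        intro hnil
        have := congrArg List.length hnil
        rw [hseg_len] at this
        simp at this
        omega
      have hmid : PySem.Int.floordiv ((b : Int) - (a : Int)) 2 + (a : Int)
          = ((a + (b - a) / 2 : Nat) : Int) := by
        have hba : ((b : Int) - (a : Int)) = ((b - a : Nat) : Int) := by omega
        rw [hba]
        rw [show ((2 : Int)) = ((2 : Nat) : Int) from rfl, PySem.Int.floordiv_natCast]
        push_cast
        ring
      have hgetA : PySem.List.pyGetD T ((a + (b - a) / 2 : Nat) : Int) 0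
          = T.getD (a + (b - a) / 2) 0 := PySem.List.pyGetD_natCast T _ 0
      have hmn : (b + 1 - a - 1) / 2 = (b - a) / 2 := by omega
      have hgetB : ((T.drop a).take (b + 1 - a)).getD ((b - a) / 2) 0
          = T.getD (a + (b - a) / 2) 0 := by
        have hlt : (b - a) / 2 < b + 1 - a := by omega
        simp [List.getD_eq_getElem?_getD, List.getElem?_drop, hlt]
      rw [dif_pos hij, hmid, hgetA]
      conv_rhs => rw [recB]
      rw [dif_neg hne, hseg_len]
      simp only [hmn]
      rw [hgetB]
      by_cases hcond : T.getD (a + (b - a) / 2) 0 = ((a + (b - a) / 2 : Nat) : Int)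
      · have hcond' : T.getD (a + (b - a) / 2) 0
            = (a : Int) + ((b - a) / 2 : Nat) := by
          rw [hcond]; push_cast; ring
        rw [if_pos hcond, if_pos hcond']
        have hmeas : (((b : Int)) + 1 - (((a + (b - a) / 2 : Nat) : Int) + 1)).toNat ≤ k := by
          omega
        have hstep := ih (((a + (b - a) / 2 : Nat) : Int) + 1) (b : Int) hmeas
          (by omega) hj
        rw [hstep]
        have hdrop : ((T.drop a).take (b + 1 - a)).drop ((b - a) / 2 + 1)
            = (T.drop ((((a + (b - a) / 2 : Nat) : Int) + 1)).toNat).take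
                (((b : Int) + 1 - (((a + (b - a) / 2 : Nat) : Int) + 1)).toNat) := by
          rw [List.drop_take, List.drop_drop]
          congr 1 <;> omega
        have hbase : ((a + (b - a) / 2 : Nat) : Int) + 1
            = (a : Int) + ((b - a) / 2 : Nat) + 1 := by push_cast; ring
        rw [hdrop, hbase]
      · have hcond' : ¬ T.getD (a + (b - a) / 2) 0
            = (a : Int) + ((b - a) / 2 : Nat) := by
          intro hx
          apply hcond
          rw [hx]; push_cast; ring
        rw [if_neg hcond, if_neg hcond']
        have hmeas : ((((a + (b - a) / 2 : Nat) : Int) - 1) + 1 - (a : Int)).toNat ≤ k := by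
          omega
        have hstep := ih ((a : Int)) (((a + (b - a) / 2 : Nat) : Int) - 1) hmeas hi
          (by push_cast; omega)
        rw [hstep, htn]
        have htake : ((T.drop a).take (b + 1 - a)).take ((b - a) / 2)
            = (T.drop a).take (((((a + (b - a) / 2 : Nat) : Int) - 1) + 1 - (a : Int)).toNat) := by
          rw [List.take_take]
          congr 1
          omega
        rw [htake]
    · rw [dif_neg hij]
      have h0 : (j + 1 - i).toNat = 0 := by omega
      rw [h0]
      simp [recB]

-- ===== VERDICT (by name: the statement is the Claim_ definition above) =====
theorem find_min_missing_spec : Claim_equal_find_min_missing := by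
  intro T _
  unfold Spec_find_min_missing find_min_missing find_min_missing_alt
  have h := loop_eq_rec (T.length) T 0 (T.length - 1) (by omega) (by omega) (by omega)
  simpa using h
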